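-- pv_equiv track=rewrite | github.com/grapheneaffiliate/h4-polytopic-attention | solve_arc2_train_ad.py | solve_973e499e
-- ===== SOURCE A (Python) =====
-- def solve_973e499e(grid):
--     """Each cell becomes NxN block showing only that color's positions."""
--     n=len(grid)
--     out=[[0]*(n*n) for _ in range(n*n)]
--     for mr in range(n):
--         for mc in range(n):
--             cc=grid[mr][mc]
--             if cc!=0:
--                 for r in range(n):
--                     for c in range(n):
--                         if grid[r][c]==cc:
--                             out[mr*n+r][mc*n+c]=cc
--     return out
-- ===== SOURCE B (Python) =====
-- def solve_973e499e(grid):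
--     """Each cell becomes NxN block showing only that color's positions."""
--     n = len(grid)
--     pos = {}
--     for r in range(n):
--         for c in range(n):
--             v = grid[r][c]
--             if v != 0:
--                 pos[v] = pos.get(v, []) + [(r, c)]
--     out = [[0] * (n * n) for _ in range(n * n)]
--     for mr in range(n):
--         for mc in range(n):
--             cc = grid[mr][mc]
--             if cc != 0:
--                 for (r, c) in pos[cc]:
--                     out[mr * n + r][mc * n + c] = cc
--     return out
-- ===== Notes on version B (the rewrite author's own statement) =====
-- stated objective: alternative
-- what changed: A rescans the whole grid for matches of each nonzero cell's color; B builds a color-to-positions index in one pass and then stamps only the matching coordinates per source cell.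
-- outside the precondition, e.g. on solve_973e499e([[1, 0], [0]]): A raises IndexError, B raises IndexError
import Mathlib
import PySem

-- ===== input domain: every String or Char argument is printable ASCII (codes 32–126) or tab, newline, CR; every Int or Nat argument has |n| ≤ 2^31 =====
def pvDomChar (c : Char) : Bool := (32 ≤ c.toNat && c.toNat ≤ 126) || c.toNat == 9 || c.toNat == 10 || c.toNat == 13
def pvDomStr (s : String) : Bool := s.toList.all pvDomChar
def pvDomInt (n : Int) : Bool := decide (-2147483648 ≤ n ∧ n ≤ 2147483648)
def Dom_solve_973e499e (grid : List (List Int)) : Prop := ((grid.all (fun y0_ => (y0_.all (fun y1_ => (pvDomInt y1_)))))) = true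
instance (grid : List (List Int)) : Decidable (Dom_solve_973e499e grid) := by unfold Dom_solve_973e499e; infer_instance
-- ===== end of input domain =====

-- B replaces A's inner full-grid rescan for each nonzero cell by a color→positions
-- index built once, then stamps only the matching coordinates (alternative decomposition,
-- usually fewer inner iterations).

-- shared primitive: grid[r][c] read (in range on Pre_) and out[i][j] = v assignment
def pvCell (grid : List (List Int)) (r c : Nat) : Int := (grid.getD r []).getD c 0
def pvWrite (out : List (List Int)) (i j : Nat) (v : Int) : List (List Int) :=
  out.set i ((out.getD i []).set j v)

-- ===== PORT A =====
def solve_973e499e (grid : List (List Int)) : List (List Int) :=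
  let n := grid.length
  let out0 := List.replicate (n*n) (List.replicate (n*n) (0:Int))
  (List.range n).foldl (fun out mr =>
    (List.range n).foldl (fun out mc =>
      let cc := pvCell grid mr mc
      if cc ≠ 0 then
        (List.range n).foldl (fun out r =>
          (List.range n).foldl (fun out c =>
            if pvCell grid r c = cc then pvWrite out (mr*n+r) (mc*n+c) cc else out) out) out
      else out) out) out0

-- ===== PORT B =====
-- pos = {}; for r,c: v=grid[r][c]; if v!=0: pos[v] = pos.get(v,[]) + [(r,c)]
def pvBuildPos (grid : List (List Int)) : PySem.Dict Int (List (Nat × Nat)) :=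
  let n := grid.length
  (List.range n).foldl (fun d r =>
    (List.range n).foldl (fun d c =>
      let v := pvCell grid r c
      if v ≠ 0 then d.insert v (d.getD v [] ++ [(r, c)]) else d) d) PySem.Dict.empty

def solve_973e499e_alt (grid : List (List Int)) : List (List Int) :=
  let n := grid.length
  let pos := pvBuildPos grid
  let out0 := List.replicate (n*n) (List.replicate (n*n) (0:Int))
  (List.range n).foldl (fun out mr =>
    (List.range n).foldl (fun out mc =>
      let cc := pvCell grid mr mc
      if cc ≠ 0 then
        (pos.getD cc []).foldl (fun out p => pvWrite out (mr*n+p.1) (mc*n+p.2) cc) out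
      else out) out) out0

-- ===== PRECONDITION & SPEC =====
-- Pre_ excludes exactly the grids with a row shorter than len(grid): there A raises IndexError.
def Pre_solve_973e499e (grid : List (List Int)) : Prop :=
  ∀ row ∈ grid, grid.length ≤ row.length
instance (grid : List (List Int)) : Decidable (Pre_solve_973e499e grid) := by
  unfold Pre_solve_973e499e; infer_instance
def pvWitness_solve_973e499e : List (List Int) := [[1, 0], [0, 2]]

def Spec_solve_973e499e (grid : List (List Int)) (out : List (List Int)) : Prop := out = solve_973e499e_alt grid
instance (grid : List (List Int)) (out : List (List Int)) : Decidable (Spec_solve_973e499e grid out) := by unfold Spec_solve_973e499e; infer_instance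

-- ===== CLAIM (what is proved, stated in full; the proofs are below) =====
def Claim_equal_solve_973e499e : Prop := ∀ (grid : List (List Int)), Dom_solve_973e499e grid → Pre_solve_973e499e grid → Spec_solve_973e499e grid (solve_973e499e grid)

-- ===== LEMMAS AND PROOFS =====

-- row-major list of all coordinates
def pvCells (n : Nat) : List (Nat × Nat) :=
  (List.range n).flatMap (fun r => (List.range n).map (fun c => (r, c)))

theorem foldl_flatMap' {α γ β : Type} (l : List α) (f : α → List γ) (g : β → γ → β) (b : β) :
    (l.flatMap f).foldl g b = l.foldl (fun b a => (f a).foldl g b) b := by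
  induction l generalizing b with
  | nil => rfl
  | cons x xs ih => simp [List.flatMap_cons, List.foldl_append, ih]

theorem nested_eq_cells {β : Type} (n : Nat) (g : β → Nat → Nat → β) (b : β) :
    (List.range n).foldl (fun b r => (List.range n).foldl (fun b c => g b r c) b) b
      = (pvCells n).foldl (fun b p => g b p.1 p.2) b := by
  simp [pvCells, foldl_flatMap', List.foldl_map]

theorem foldl_if_filterMap {α β : Type} (l : List α) (P : α → Bool) (f : β → α → β) (b : β) :
    l.foldl (fun b a => if P a then f b a else b) b
      = (l.filterMap (fun a => if P a then some a else none)).foldl f b := by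
  induction l generalizing b with
  | nil => rfl
  | cons x xs ih => by_cases h : P x <;> simp [h, ih]

-- the positions of color v collected by the dict-building loop, for v ≠ 0
theorem foldl_congr' {α β : Type} (l : List α) (f g : β → α → β) (b : β)
    (h : ∀ b a, f b a = g b a) : l.foldl f b = l.foldl g b := by
  rw [funext fun b => funext fun a => h b a]

theorem buildPos_getD_aux (grid : List (List Int)) (l : List (Nat × Nat))
    (d : PySem.Dict Int (List (Nat × Nat))) (v : Int) (hv : v ≠ 0) :
    (l.foldl (fun d p =>
        if pvCell grid p.1 p.2 ≠ 0 then
          d.insert (pvCell grid p.1 p.2) (d.getD (pvCell grid p.1 p.2) [] ++ [p]) else d) d).getD v []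
      = d.getD v [] ++ l.filterMap (fun p => if pvCell grid p.1 p.2 = v then some p else none) := by
  induction l generalizing d with
  | nil => simp
  | cons p ps ih =>
    rw [List.foldl_cons, ih]
    by_cases h0 : pvCell grid p.1 p.2 = 0
    · have hne : ¬ pvCell grid p.1 p.2 = v := by rw [h0]; exact fun h => hv h.symm
      simp [h0, Ne.symm hv]
    · by_cases hev : pvCell grid p.1 p.2 = v
      · simp [hev, hv]
      · have hne' : ¬ v = pvCell grid p.1 p.2 := fun h => hev h.symm
        simp [hev, hne', h0, PySem.Dict.getD_insert]

theorem buildPos_getD (grid : List (List Int)) (v : Int) (hv : v ≠ 0) :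
    (pvBuildPos grid).getD v []
      = (pvCells grid.length).filterMap
          (fun p => if pvCell grid p.1 p.2 = v then some p else none) := by
  have h : pvBuildPos grid
      = (pvCells grid.length).foldl (fun d p =>
          if pvCell grid p.1 p.2 ≠ 0 then
            d.insert (pvCell grid p.1 p.2) (d.getD (pvCell grid p.1 p.2) [] ++ [p]) else d)
        PySem.Dict.empty := by
    show (List.range grid.length).foldl (fun d r =>
        (List.range grid.length).foldl (fun d c =>
          if pvCell grid r c ≠ 0 then
            d.insert (pvCell grid r c) (d.getD (pvCell grid r c) [] ++ [(r, c)]) else d) d)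
        PySem.Dict.empty = _
    exact nested_eq_cells grid.length
      (fun d r c => if pvCell grid r c ≠ 0 then
          d.insert (pvCell grid r c) (d.getD (pvCell grid r c) [] ++ [(r, c)]) else d)
      PySem.Dict.empty
  rw [h, buildPos_getD_aux grid _ _ v hv]
  simp

theorem inner_eq (grid : List (List Int)) (out : List (List Int)) (mr mc : Nat)
    (cc : Int) (hcc : cc ≠ 0) :
    (List.range grid.length).foldl (fun out r =>
        (List.range grid.length).foldl (fun out c =>
          if pvCell grid r c = cc then pvWrite out (mr*grid.length+r) (mc*grid.length+c) cc
          else out) out) out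
      = ((pvBuildPos grid).getD cc []).foldl
          (fun out p => pvWrite out (mr*grid.length+p.1) (mc*grid.length+p.2) cc) out := by
  rw [nested_eq_cells grid.length
    (fun out r c => if pvCell grid r c = cc then
        pvWrite out (mr*grid.length+r) (mc*grid.length+c) cc else out) out]
  rw [buildPos_getD grid cc hcc]
  have := foldl_if_filterMap (pvCells grid.length)
    (fun p => decide (pvCell grid p.1 p.2 = cc))
    (fun out (p : Nat × Nat) => pvWrite out (mr*grid.length+p.1) (mc*grid.length+p.2) cc) out
  simpa using this

-- ===== VERDICT (by name: the statement is the Claim_ definition above) =====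
theorem solve_973e499e_spec : Claim_equal_solve_973e499e := by
  intro grid _ _
  show solve_973e499e grid = solve_973e499e_alt grid
  show (List.range grid.length).foldl (fun out mr =>
      (List.range grid.length).foldl (fun out mc =>
        if pvCell grid mr mc ≠ 0 then
          (List.range grid.length).foldl (fun out r =>
            (List.range grid.length).foldl (fun out c =>
              if pvCell grid r c = pvCell grid mr mc then
                pvWrite out (mr*grid.length+r) (mc*grid.length+c) (pvCell grid mr mc)
              else out) out) out
        else out) out)
      (List.replicate (grid.length*grid.length) (List.replicate (grid.length*grid.length) (0:Int)))
    = (List.range grid.length).foldl (fun out mr =>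
      (List.range grid.length).foldl (fun out mc =>
        if pvCell grid mr mc ≠ 0 then
          ((pvBuildPos grid).getD (pvCell grid mr mc) []).foldl
            (fun out p => pvWrite out (mr*grid.length+p.1) (mc*grid.length+p.2) (pvCell grid mr mc)) out
        else out) out)
      (List.replicate (grid.length*grid.length) (List.replicate (grid.length*grid.length) (0:Int)))
  have hbody : ∀ (out : List (List Int)) (mr : Nat),
      (List.range grid.length).foldl (fun out mc =>
        if pvCell grid mr mc ≠ 0 then
          (List.range grid.length).foldl (fun out r =>
            (List.range grid.length).foldl (fun out c =>
              if pvCell grid r c = pvCell grid mr mc then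
                pvWrite out (mr*grid.length+r) (mc*grid.length+c) (pvCell grid mr mc)
              else out) out) out
        else out) out
      = (List.range grid.length).foldl (fun out mc =>
        if pvCell grid mr mc ≠ 0 then
          ((pvBuildPos grid).getD (pvCell grid mr mc) []).foldl
            (fun out p => pvWrite out (mr*grid.length+p.1) (mc*grid.length+p.2) (pvCell grid mr mc)) out
        else out) out := by
    intro out mr
    refine foldl_congr' _ _ _ _ ?_
    intro acc mc
    by_cases hcc : pvCell grid mr mc = 0
    · simp [hcc]
    · simp only [ne_eq, hcc, not_false_eq_true, if_true]
      exact inner_eq grid acc mr mc _ hcc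
  exact foldl_congr' _ _ _ _ hbody
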